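-- pv_equiv track=rewrite | github.com/bchwast/wiet | ASD/Ćwiczenia 5/words_to_text.py | construct_text
-- ===== SOURCE A (Python) =====
-- def construct_text(words, text):
--     solutions = [[["", None] for _ in range(len(text) + 1)] for _ in range(len(words))]
--
--     for i in range(1, len(text) + 1):
--         for w in range(len(words)):
--             if words[w] == text[:i]:
--                 solutions[w][i][0] = words[w]
--                 solutions[w][i][1] = 1
--             elif w > 0 and i - len(words[w]) > 0 and solutions[w - 1][i - len(words[w])][0] + words[w] == text[:i]:
--                 if solutions[w - 1][i][1] != None and solutions[w - 1][i][1] < solutions[w - 1][i - len(words[w])][1] + 1: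
--                     solutions[w][i] = solutions[w - 1][i]
--                 else:
--                     solutions[w][i][0] = text[:i]
--                     solutions[w][i][1] = solutions[w - 1][i - len(words[w])][1] + 1
--             elif w > 0:
--                 solutions[w][i] = solutions[w - 1][i]
--
--     if solutions[len(words) - 1][len(text)][1] != None:
--         return solutions[len(words) - 1][len(text)][1]
--     return -1
-- ===== SOURCE B (Python) =====
-- def construct_text(words, text):
--     n = len(text)
--     dp = [0] + [None] * n
--     for w in words:
--         L = len(w)
--         for i in range(n, L - 1, -1):
--             prev = dp[i - L]
--             if prev is not None and text[i - L:i] == w: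
--                 cand = prev + 1
--                 if dp[i] is None or cand < dp[i]:
--                     dp[i] = cand
--     return dp[n] if dp[n] is not None else -1
-- ===== Notes on version B (the rewrite author's own statement) =====
-- stated objective: faster
-- what changed: B replaces A's W x (n+1) table of (prefix-string, count) pairs, which rebuilds rows and compares O(i)-long string prefixes per cell, by a single (n+1)-slot min-count array updated in place per word (0/1 in-order word DP), comparing only the length-|w| slice of the text per cell.
-- intended difference: On empty text A returns -1 (its table has no column for the empty prefix) while B returns 0: zero words spell the empty text, which is the intended value. — e.g. on construct_text(["a"], ""): A returns -1, B returns 0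
import Mathlib
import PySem

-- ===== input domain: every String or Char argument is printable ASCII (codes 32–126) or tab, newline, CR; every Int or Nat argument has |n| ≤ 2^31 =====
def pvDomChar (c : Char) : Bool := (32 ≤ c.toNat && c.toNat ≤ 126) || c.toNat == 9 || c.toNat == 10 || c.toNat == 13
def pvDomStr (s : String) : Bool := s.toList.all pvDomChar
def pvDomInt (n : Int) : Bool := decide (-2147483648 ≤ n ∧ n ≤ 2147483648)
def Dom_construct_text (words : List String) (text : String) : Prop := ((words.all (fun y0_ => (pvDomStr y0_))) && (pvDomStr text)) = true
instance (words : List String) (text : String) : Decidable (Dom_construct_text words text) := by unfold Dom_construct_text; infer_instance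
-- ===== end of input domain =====

-- B replaces A's W×(n+1) table of (prefix-string, count) pairs (rebuilt with O(i)-long string
-- comparisons per cell) by a single (n+1)-slot min-count array updated in place per word,
-- comparing only the length-|w| slice of the text (0/1 in-order word DP).

-- ===== PORT A =====
-- one step of A's inner loop (fixed column i, row w); table cells are (string, count) pairs,
-- strings ported as List Char. Python's `i - len(words[w]) > 0` is `word.length < i`;
-- `text[:i]` is `t.take i` (exact: 0 ≤ i). The `.getD 0` on `cellwm1iL.2` is only reached when
-- the preceding string equality forced that cell to hold `some _` (Python would otherwise raise
-- on `None + 1`, which is unreachable for the same reason).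
def ctA_step (t : List Char) (ws : List (List Char)) (i : Nat)
    (sols : List (List (List Char × Option Int))) (w : Nat) :
    List (List (List Char × Option Int)) :=
  let word := ws.getD w []
  let cellwm1i := (sols.getD (w - 1) []).getD i ([], none)
  let cellwm1iL := (sols.getD (w - 1) []).getD (i - word.length) ([], none)
  if word = t.take i then
    sols.set w ((sols.getD w []).set i (word, some 1))
  else if 0 < w ∧ word.length < i ∧ cellwm1iL.1 ++ word = t.take i then
    if cellwm1i.2 ≠ none ∧ cellwm1i.2.getD 0 < cellwm1iL.2.getD 0 + 1 then
      sols.set w ((sols.getD w []).set i cellwm1i)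
    else
      sols.set w ((sols.getD w []).set i (t.take i, some (cellwm1iL.2.getD 0 + 1)))
  else if 0 < w then
    sols.set w ((sols.getD w []).set i cellwm1i)
  else sols

-- `range(1, len(text)+1)` is `List.range' 1 t.length`, `range(len(words))` is `List.range ws.length`
def construct_text (words : List String) (text : String) : Int :=
  let t := text.toList
  let ws := words.map String.toList
  let init := ws.map (fun _ => (List.range (t.length + 1)).map
      (fun _ => (([] : List Char), (none : Option Int))))
  let sols := (List.range' 1 t.length).foldl
      (fun sols i => (List.range ws.length).foldl (ctA_step t ws i) sols) init
  match ((sols.getD (ws.length - 1) []).getD t.length ([], none)).2 with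
  | some c => c
  | none => -1

-- ===== PORT B =====
-- one word of B: in-place descending update of the (n+1)-slot dp array.
-- `range(n, L-1, -1)` (all i with L ≤ i ≤ n, descending) is `(List.range' L (n+1-L)).reverse`;
-- `text[i-L:i]` is `(t.drop (i-L)).take L` (exact: 0 ≤ i-L ≤ i ≤ n).
def ctB_step (t : List Char) (dp : List (Option Int)) (w : List Char) : List (Option Int) :=
  let L := w.length
  ((List.range' L (t.length + 1 - L)).reverse).foldl
    (fun dp i =>
      match dp.getD (i - L) none with
      | none => dp
      | some prev =>
        if (t.drop (i - L)).take L = w then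
          let cand := prev + 1
          match dp.getD i none with
          | none => dp.set i (some cand)
          | some cur => if cand < cur then dp.set i (some cand) else dp
        else dp) dp

def construct_text_alt (words : List String) (text : String) : Int :=
  let t := text.toList
  let dp0 := (some (0 : Int)) :: List.replicate t.length (none : Option Int)
  let dp := words.foldl (fun dp w => ctB_step t dp w.toList) dp0
  match dp.getD t.length none with
  | some v => v
  | none => -1

-- ===== PRECONDITION & SPEC =====
-- Pre_ excludes only words = [], on which A raises IndexError (solutions[-1] on an empty table).
def Pre_construct_text (words : List String) (text : String) : Prop := words ≠ []
instance (words : List String) (text : String) : Decidable (Pre_construct_text words text) := by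
  unfold Pre_construct_text; infer_instance
def pvWitness_construct_text : List String × String := (["ab", "c"], "abc")

-- On empty text A returns -1 (its table has no column for the empty prefix), B returns 0:
-- zero words spell the empty text, which is the intended value.
def D_construct_text (words : List String) (text : String) : Prop := text = ""
instance (words : List String) (text : String) : Decidable (D_construct_text words text) := by
  unfold D_construct_text; infer_instance

def Spec_construct_text (words : List String) (text : String) (out : Int) : Prop :=
  ¬ D_construct_text words text → out = construct_text_alt words text
instance (words : List String) (text : String) (out : Int) :
    Decidable (Spec_construct_text words text out) := by unfold Spec_construct_text; infer_instance

def pvDiffWitness_construct_text : List String × String := (["a"], "")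
def pvDiffWitnessOut_construct_text : Int × Int := (-1, 0)

-- ===== CLAIM (what is proved, stated in full; the proofs are below) =====
def Claim_unchanged_construct_text : Prop := ∀ (words : List String) (text : String), Dom_construct_text words text → Pre_construct_text words text → Spec_construct_text words text (construct_text words text)
def Claim_changed_construct_text : Prop := Dom_construct_text (pvDiffWitness_construct_text.1) (pvDiffWitness_construct_text.2) ∧ Pre_construct_text (pvDiffWitness_construct_text.1) (pvDiffWitness_construct_text.2) ∧ D_construct_text (pvDiffWitness_construct_text.1) (pvDiffWitness_construct_text.2) ∧ construct_text (pvDiffWitness_construct_text.1) (pvDiffWitness_construct_text.2) = pvDiffWitnessOut_construct_text.1 ∧ construct_text_alt (pvDiffWitness_construct_text.1) (pvDiffWitness_construct_text.2) = pvDiffWitnessOut_construct_text.2 ∧ pvDiffWitnessOut_construct_text.1 ≠ pvDiffWitnessOut_construct_text.2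
def Claim_exact_construct_text : Prop := ∀ (words : List String) (text : String), Dom_construct_text words text → Pre_construct_text words text → D_construct_text words text → construct_text words text ≠ construct_text_alt words text
-- ===== LEMMAS AND PROOFS =====

-- the shared mathematical recurrence: after processing a prefix of the word list,
-- `F t ws i` is the min-count (as an Option) of in-order words concatenating to `t.take i`.
def combine : Option Int → Option Int → Option Int
  | some p, none => some (p + 1)
  | some p, some c => if p + 1 < c then some (p + 1) else some c
  | none, fi => fi

def stepF (t : List Char) (f : Nat → Option Int) (w : List Char) : Nat → Option Int :=
  fun i =>
    if w.length ≤ i ∧ (t.drop (i - w.length)).take w.length = w then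
      combine (f (i - w.length)) (f i)
    else f i
def F0 : Nat → Option Int := fun i => if i = 0 then some 0 else none
def F (t : List Char) (ws : List (List Char)) : Nat → Option Int := ws.foldl (stepF t) F0

theorem getD_set_self {α : Type} (l : List α) (i : Nat) (h : i < l.length) (v d : α) :
    (l.set i v).getD i d = v := by simp [List.getD, h]
theorem getD_set_ne {α : Type} (l : List α) (i j : Nat) (h : i ≠ j) (v d : α) :
    (l.set i v).getD j d = l.getD j d := by simp [List.getD, List.getElem?_set_ne h]

theorem stepF_of_lt (t w : List Char) (f : Nat → Option Int) (j : Nat) (h : j < w.length) :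
    stepF t f w j = f j := by
  unfold stepF
  rw [if_neg]
  intro hco
  omega

theorem ctB_inner (t w : List Char) (f : Nat → Option Int) :
    ∀ (m : Nat) (dp : List (Option Int)),
    dp.length = t.length + 1 →
    w.length + m ≤ t.length + 1 →
    (∀ j, j < w.length + m → dp.getD j none = f j) →
    (∀ j, w.length + m ≤ j → j ≤ t.length → dp.getD j none = stepF t f w j) →
    (((List.range' w.length m).reverse).foldl
      (fun dp i =>
        match dp.getD (i - w.length) none with
        | none => dp
        | some prev =>
          if (t.drop (i - w.length)).take w.length = w then
            let cand := prev + 1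
            match dp.getD i none with
            | none => dp.set i (some cand)
            | some cur => if cand < cur then dp.set i (some cand) else dp
          else dp) dp).length = t.length + 1 ∧
    ∀ j, j ≤ t.length → (((List.range' w.length m).reverse).foldl
      (fun dp i =>
        match dp.getD (i - w.length) none with
        | none => dp
        | some prev =>
          if (t.drop (i - w.length)).take w.length = w then
            let cand := prev + 1
            match dp.getD i none with
            | none => dp.set i (some cand)
            | some cur => if cand < cur then dp.set i (some cand) else dp
          else dp) dp).getD j none = stepF t f w j := by
  intro m
  induction m with
  | zero =>
    intro dp hlen hb h1 h2
    simp only [List.range'_zero, List.reverse_nil, List.foldl_nil]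
    refine ⟨hlen, fun j hj => ?_⟩
    by_cases hjL : j < w.length
    · rw [stepF_of_lt t w f j hjL]; exact h1 j (by omega)
    · exact h2 j (by omega) hj
  | succ m ih =>
    intro dp hlen hb h1 h2
    rw [List.range'_1_concat, List.reverse_append, List.reverse_singleton, List.singleton_append,
      List.foldl_cons]
    set i := w.length + m with hi
    have hin : i ≤ t.length := by omega
    have hgiL : dp.getD (i - w.length) none = f (i - w.length) := h1 _ (by omega)
    have hgi : dp.getD i none = f i := h1 _ (by omega)
    have hm : i - w.length = m := by omega
    -- the one-step result
    set dp1 := (match dp.getD (i - w.length) none with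
      | none => dp
      | some prev =>
        if (t.drop (i - w.length)).take w.length = w then
          let cand := prev + 1
          match dp.getD i none with
          | none => dp.set i (some cand)
          | some cur => if cand < cur then dp.set i (some cand) else dp
        else dp) with hdp1
    have hstep : dp1.length = t.length + 1 ∧ dp1.getD i none = stepF t f w i ∧
        ∀ j, j ≠ i → dp1.getD j none = dp.getD j none := by
      cases hfl : f (i - w.length) with
      | none =>
        have e : dp1 = dp := by rw [hdp1, hgiL, hfl]
        have e2 : stepF t f w i = f i := by unfold stepF; split <;> simp [combine, hfl]
        rw [e, e2]
        exact ⟨hlen, hgi, fun j hj => rfl⟩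
      | some p =>
        by_cases hsl : (t.drop (i - w.length)).take w.length = w
        · have hcond : w.length ≤ i ∧ (t.drop (i - w.length)).take w.length = w := ⟨by omega, hsl⟩
          have e2 : stepF t f w i = combine (some p) (f i) := by
            unfold stepF; rw [if_pos hcond, hfl]
          cases hfi : f i with
          | none =>
            have e : dp1 = dp.set i (some (p + 1)) := by
              rw [hdp1, hgiL, hfl]; simp only [if_pos hsl]; rw [hgi, hfi]
            rw [e, e2, hfi]
            exact ⟨by simp [hlen], by rw [getD_set_self dp i (by omega)]; rfl,
              fun j hj => getD_set_ne dp i j (fun h => hj h.symm) _ _⟩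
          | some cur =>
            by_cases hlt : p + 1 < cur
            · have e : dp1 = dp.set i (some (p + 1)) := by
                rw [hdp1, hgiL, hfl]; simp only [if_pos hsl]; rw [hgi, hfi]
                simp only [if_pos hlt]
              rw [e, e2, hfi]
              exact ⟨by simp [hlen], by rw [getD_set_self dp i (by omega)]; simp [combine, hlt],
                fun j hj => getD_set_ne dp i j (fun h => hj h.symm) _ _⟩
            · have e : dp1 = dp := by
                rw [hdp1, hgiL, hfl]; simp only [if_pos hsl]; rw [hgi, hfi]
                simp only [if_neg hlt]
              rw [e, e2, hfi]
              exact ⟨hlen, by rw [hgi, hfi]; simp [combine, hlt], fun j hj => rfl⟩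
        · have e : dp1 = dp := by rw [hdp1, hgiL, hfl]; simp only [if_neg hsl]
          have e2 : stepF t f w i = f i := by
            unfold stepF; rw [if_neg (fun hco => hsl hco.2)]
          rw [e, e2]
          exact ⟨hlen, hgi, fun j hj => rfl⟩
    obtain ⟨hl1, he1, hne1⟩ := hstep
    have := ih dp1 hl1 (by omega)
      (fun j hj => by rw [hne1 j (by omega)]; exact h1 j (by omega))
      (fun j hjl hjr => by
        by_cases hji : j = i
        · rw [hji]; exact he1
        · rw [hne1 j hji]; exact h2 j (by omega) hjr)
    exact this

theorem ctB_step_spec (t w : List Char) (f : Nat → Option Int) (dp : List (Option Int))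
    (hlen : dp.length = t.length + 1) (hinv : ∀ j, j ≤ t.length → dp.getD j none = f j) :
    (ctB_step t dp w).length = t.length + 1 ∧
    ∀ j, j ≤ t.length → (ctB_step t dp w).getD j none = stepF t f w j := by
  by_cases hL : w.length ≤ t.length + 1
  · have := ctB_inner t w f (t.length + 1 - w.length) dp hlen (by omega)
      (fun j hj => hinv j (by omega)) (fun j hjl hjr => by omega)
    exact this
  · have he : t.length + 1 - w.length = 0 := by omega
    simp only [ctB_step]
    rw [he]
    simp only [List.range'_zero, List.reverse_nil, List.foldl_nil]
    exact ⟨hlen, fun j hj => by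
      rw [stepF_of_lt t w f j (by omega)]; exact hinv j hj⟩

theorem ctB_fold (t : List Char) (ws : List (List Char)) :
    ∀ (f : Nat → Option Int) (dp : List (Option Int)),
    dp.length = t.length + 1 → (∀ j, j ≤ t.length → dp.getD j none = f j) →
    (ws.foldl (ctB_step t) dp).length = t.length + 1 ∧
    ∀ j, j ≤ t.length → (ws.foldl (ctB_step t) dp).getD j none = (ws.foldl (stepF t) f) j := by
  induction ws with
  | nil => exact fun f dp h1 h2 => ⟨h1, h2⟩
  | cons w ws ih =>
    intro f dp h1 h2
    obtain ⟨h1', h2'⟩ := ctB_step_spec t w f dp h1 h2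
    exact ih (stepF t f w) (ctB_step t dp w) h1' h2'

theorem stepF_zero (t : List Char) (w : List Char) (f : Nat → Option Int)
    (h : f 0 = some 0) : stepF t f w 0 = some 0 := by
  unfold stepF
  rcases w with _ | ⟨c, w⟩
  · simp [h, combine]
  · simp [h]

theorem foldl_stepF_zero (t : List Char) (ws : List (List Char)) (f : Nat → Option Int)
    (h : f 0 = some 0) : (ws.foldl (stepF t) f) 0 = some 0 := by
  induction ws generalizing f with
  | nil => exact h
  | cons w ws ih => exact ih _ (stepF_zero t w f h)

theorem F_zero (t : List Char) (ws : List (List Char)) : F t ws 0 = some 0 :=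
  foldl_stepF_zero t ws F0 rfl

theorem stepF_pos (t : List Char) (w : List Char) (f : Nat → Option Int)
    (h0 : f 0 = some 0) (h : ∀ i c, 1 ≤ i → f i = some c → 1 ≤ c) :
    ∀ i c, 1 ≤ i → stepF t f w i = some c → 1 ≤ c := by
  intro i c hi hc
  unfold stepF at hc
  split at hc
  · rename_i hcond
    cases hp : f (i - w.length) with
    | none => rw [hp] at hc; simp [combine] at hc; exact h i c hi hc
    | some p =>
      rw [hp] at hc
      have hp1 : 0 ≤ p := by
        rcases Nat.eq_zero_or_pos (i - w.length) with h0' | h1'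
        · rw [h0', h0] at hp; injection hp with hp; omega
        · have := h _ _ h1' hp; omega
      cases hq : f i with
      | none => rw [hq] at hc; simp [combine] at hc; omega
      | some q =>
        rw [hq] at hc
        have hq1 := h _ _ hi hq
        simp only [combine] at hc
        split at hc <;> (injection hc with hc; omega)
  · exact h i c hi hc

theorem foldl_stepF_pos (t : List Char) (ws : List (List Char)) (f : Nat → Option Int)
    (h0 : f 0 = some 0) (h : ∀ i c, 1 ≤ i → f i = some c → 1 ≤ c) :
    ∀ i c, 1 ≤ i → (ws.foldl (stepF t) f) i = some c → 1 ≤ c := by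
  induction ws generalizing f with
  | nil => exact h
  | cons w ws ih => exact ih _ (stepF_zero t w f h0) (stepF_pos t w f h0 h)

theorem F_pos (t : List Char) (ws : List (List Char)) :
    ∀ i c, 1 ≤ i → F t ws i = some c → 1 ≤ c :=
  foldl_stepF_pos t ws F0 rfl (fun i c hi hc => by simp [F0, Nat.pos_iff_ne_zero.mp hi] at hc)

theorem take_split (t w : List Char) (i : Nat) (hL : w.length ≤ i) :
    t.take i = t.take (i - w.length) ++ (t.drop (i - w.length)).take w.length := by
  rw [← List.take_add]; congr 1; omega

theorem take_append_iff (t w : List Char) (i : Nat) (hL : w.length ≤ i) :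
    (t.take (i - w.length) ++ w = t.take i) ↔ ((t.drop (i - w.length)).take w.length = w) := by
  rw [take_split t w i hL]
  exact ⟨fun he => (List.append_cancel_left he).symm, fun he => by rw [he]⟩

-- ===== A table spec =====
def cellSpec (t : List Char) (ws : List (List Char)) (w i : Nat) : List Char × Option Int :=
  match F t (ws.take (w + 1)) i with
  | some c => (t.take i, some c)
  | none => ([], none)

theorem cellSpec_snd (t : List Char) (ws : List (List Char)) (w i : Nat) :
    (cellSpec t ws w i).2 = F t (ws.take (w + 1)) i := by
  unfold cellSpec
  cases F t (ws.take (w + 1)) i <;> rfl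

theorem F_take_succ (t : List Char) (ws : List (List Char)) (m : Nat) (hm : m < ws.length) :
    F t (ws.take (m + 1)) = stepF t (F t (ws.take m)) (ws.getD m []) := by
  have h : ws.take (m + 1) = ws.take m ++ [ws.getD m []] := by
    rw [List.take_add_one]
    simp [List.getElem?_eq_getElem hm, List.getD]
  rw [F, h, List.foldl_append]
  rfl

theorem word_len_of_prefix (t word : List Char) (k : Nat) (hk : k ≤ t.length)
    (h : word = t.take k) : word.length = k := by
  rw [h, List.length_take]; omega

-- combine with a `some` left argument is the min-shift
theorem ctA_step_spec (t : List Char) (ws : List (List Char)) (k : Nat)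
    (hk1 : 1 ≤ k) (hkn : k ≤ t.length) (m : Nat) (hm : m < ws.length)
    (sols : List (List (List Char × Option Int)))
    (hlen : sols.length = ws.length)
    (hrow : ∀ w, w < ws.length → (sols.getD w []).length = t.length + 1)
    (hother : ∀ w, w < ws.length → ∀ j, j ≤ t.length → j ≠ k →
      (sols.getD w []).getD j ([], none) =
        if 1 ≤ j ∧ j < k then cellSpec t ws w j else ([], none))
    (hdone : ∀ w, w < m → (sols.getD w []).getD k ([], none) = cellSpec t ws w k)
    (htodo : (sols.getD m []).getD k ([], none) = ([], none)) :
    (ctA_step t ws k sols m).length = ws.length ∧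
    (∀ w, w ≠ m → (ctA_step t ws k sols m).getD w [] = sols.getD w []) ∧
    ((ctA_step t ws k sols m).getD m []).length = t.length + 1 ∧
    (∀ j, j ≠ k → ((ctA_step t ws k sols m).getD m []).getD j ([], none) =
      (sols.getD m []).getD j ([], none)) ∧
    ((ctA_step t ws k sols m).getD m []).getD k ([], none) = cellSpec t ws m k := by
  have hmlt : m < sols.length := by omega
  have hklt : k < (sols.getD m []).length := by rw [hrow m hm]; omega
  -- generic facts about a "set" result
  have hset : ∀ v : List Char × Option Int,
      (sols.set m ((sols.getD m []).set k v)).length = ws.length ∧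
      (∀ w, w ≠ m → (sols.set m ((sols.getD m []).set k v)).getD w [] = sols.getD w []) ∧
      ((sols.set m ((sols.getD m []).set k v)).getD m []).length = t.length + 1 ∧
      (∀ j, j ≠ k → ((sols.set m ((sols.getD m []).set k v)).getD m []).getD j ([], none) =
        (sols.getD m []).getD j ([], none)) ∧
      ((sols.set m ((sols.getD m []).set k v)).getD m []).getD k ([], none) = v := by
    intro v
    refine ⟨by simp [hlen], fun w hw => getD_set_ne sols m w (fun h => hw h.symm) _ _, ?_, ?_, ?_⟩
    · rw [getD_set_self sols m hmlt, List.length_set]; exact hrow m hm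
    · intro j hj
      rw [getD_set_self sols m hmlt, getD_set_ne _ k j (fun h => hj h.symm)]
    · rw [getD_set_self sols m hmlt, getD_set_self _ k hklt]
  set word := ws.getD m [] with hword
  by_cases hb1 : word = t.take k
  · -- first branch: fresh match, count 1
    have hLk : word.length = k := word_len_of_prefix t word k hkn hb1
    have e : ctA_step t ws k sols m = sols.set m ((sols.getD m []).set k (word, some 1)) := by
      unfold ctA_step
      rw [← hword, if_pos hb1]
    have hv : cellSpec t ws m k = (word, some 1) := by
      unfold cellSpec
      rw [F_take_succ t ws m hm, ← hword]
      unfold stepF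
      have hsl : (t.drop (k - word.length)).take word.length = word := by
        rw [hLk]; simp [hb1]
      rw [if_pos ⟨by omega, hsl⟩, hLk]
      simp only [Nat.sub_self]
      rw [F_zero]
      cases hFk : F t (ws.take m) k with
      | none => simp [combine, hb1]
      | some c =>
        have hc1 := F_pos t (ws.take m) k c hk1 hFk
        simp only [combine, zero_add]
        by_cases h1c : 1 < c
        · rw [if_pos h1c]; simp [hb1]
        · rw [if_neg h1c]
          have hce : c = 1 := by omega
          simp [hce, hb1]
    rw [e, hv]
    exact hset (word, some 1)
  · by_cases hb2 : 0 < m ∧ word.length < k ∧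
        ((sols.getD (m - 1) []).getD (k - word.length) ([], none)).1 ++ word = t.take k
    · obtain ⟨hm0, hLk, hcat⟩ := hb2
      have hm1 : m - 1 + 1 = m := by omega
      have hprev : (sols.getD (m - 1) []).getD (k - word.length) ([], none) =
          cellSpec t ws (m - 1) (k - word.length) := by
        by_cases hL0 : word.length = 0
        · rw [hL0, Nat.sub_zero]; exact hdone (m - 1) (by omega)
        · rw [hother (m - 1) (by omega) (k - word.length) (by omega) (by omega),
            if_pos ⟨by omega, by omega⟩]
      have hcur : (sols.getD (m - 1) []).getD k ([], none) = cellSpec t ws (m - 1) k :=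
        hdone (m - 1) (by omega)
      cases hFp : F t (ws.take m) (k - word.length) with
      | none =>
        exfalso
        apply hb1
        rw [hprev] at hcat
        unfold cellSpec at hcat
        rw [hm1, hFp] at hcat
        simpa using hcat
      | some p =>
        have hc1 : cellSpec t ws (m - 1) (k - word.length) = (t.take (k - word.length), some p) := by
          unfold cellSpec; rw [hm1, hFp]
        have hslice : (t.drop (k - word.length)).take word.length = word := by
          rw [← take_append_iff t word k (by omega)]
          rw [hprev, hc1] at hcat
          exact hcat
        have hF1 : F t (ws.take (m + 1)) k = combine (some p) (F t (ws.take m) k) := by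
          rw [F_take_succ t ws m hm, ← hword]
          unfold stepF
          rw [if_pos ⟨by omega, hslice⟩, hFp]
        have e0 : ctA_step t ws k sols m =
            (if ((sols.getD (m - 1) []).getD k ([], none)).2 ≠ none ∧
                ((sols.getD (m - 1) []).getD k ([], none)).2.getD 0 <
                  ((sols.getD (m - 1) []).getD (k - word.length) ([], none)).2.getD 0 + 1 then
              sols.set m ((sols.getD m []).set k ((sols.getD (m - 1) []).getD k ([], none)))
            else
              sols.set m ((sols.getD m []).set k
                (t.take k, some (((sols.getD (m - 1) []).getD (k - word.length) ([], none)).2.getD 0 + 1)))) := by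
          unfold ctA_step
          rw [← hword, if_neg hb1, if_pos ⟨hm0, hLk, hcat⟩]
        cases hFk : F t (ws.take m) k with
        | none =>
          have hcnone : cellSpec t ws (m - 1) k = ([], none) := by
            unfold cellSpec; rw [hm1, hFk]
          have e : ctA_step t ws k sols m =
              sols.set m ((sols.getD m []).set k (t.take k, some (p + 1))) := by
            rw [e0, hcur, hcnone, hprev, hc1]
            simp
          have hv : cellSpec t ws m k = (t.take k, some (p + 1)) := by
            unfold cellSpec; rw [hF1, hFk]; rfl
          rw [e, hv]; exact hset _
        | some c =>
          have hccur : cellSpec t ws (m - 1) k = (t.take k, some c) := by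
            unfold cellSpec; rw [hm1, hFk]
          by_cases hlt : c < p + 1
          · have e : ctA_step t ws k sols m =
                sols.set m ((sols.getD m []).set k (t.take k, some c)) := by
              rw [e0, hcur, hccur, hprev, hc1]
              rw [if_pos ⟨by simp, by simpa using hlt⟩]
            have hv : cellSpec t ws m k = (t.take k, some c) := by
              unfold cellSpec; rw [hF1, hFk]
              simp only [combine]
              rw [if_neg (by omega)]
            rw [e, hv]; exact hset _
          · have e : ctA_step t ws k sols m =
                sols.set m ((sols.getD m []).set k (t.take k, some (p + 1))) := by
              rw [e0, hcur, hccur, hprev, hc1]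
              rw [if_neg (by simp; omega)]
              rfl
            have hv : cellSpec t ws m k = (t.take k, some (p + 1)) := by
              unfold cellSpec; rw [hF1, hFk]
              simp only [combine]
              by_cases hpc : p + 1 < c
              · rw [if_pos hpc]
              · rw [if_neg hpc]
                have hce : c = p + 1 := by omega
                rw [hce]
            rw [e, hv]; exact hset _
    · by_cases hm0 : 0 < m
      · -- plain copy of the row above
        have hm1 : m - 1 + 1 = m := by omega
        have hFeq : F t (ws.take (m + 1)) k = F t (ws.take m) k := by
          rw [F_take_succ t ws m hm, ← hword]
          unfold stepF
          by_cases hcond : word.length ≤ k ∧ (t.drop (k - word.length)).take word.length = word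
          · rw [if_pos hcond]
            obtain ⟨hLk', hsl⟩ := hcond
            by_cases hLeq : word.length = k
            · exfalso; apply hb1
              rw [← hsl, hLeq]; simp
            · have hLlt : word.length < k := by omega
              cases hFp : F t (ws.take m) (k - word.length) with
              | none => cases F t (ws.take m) k <;> rfl
              | some p =>
                exfalso; apply hb2
                refine ⟨hm0, hLlt, ?_⟩
                have hprev : (sols.getD (m - 1) []).getD (k - word.length) ([], none) =
                    cellSpec t ws (m - 1) (k - word.length) := by
                  by_cases hL0 : word.length = 0
                  · rw [hL0, Nat.sub_zero]; exact hdone (m - 1) (by omega)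
                  · rw [hother (m - 1) (by omega) (k - word.length) (by omega) (by omega),
                      if_pos ⟨by omega, by omega⟩]
                rw [hprev]
                unfold cellSpec
                rw [hm1, hFp]
                rw [take_append_iff t word k (by omega)]
                exact hsl
          · rw [if_neg hcond]
        have e : ctA_step t ws k sols m =
            sols.set m ((sols.getD m []).set k ((sols.getD (m - 1) []).getD k ([], none))) := by
          unfold ctA_step
          rw [← hword, if_neg hb1, if_neg hb2, if_pos hm0]
        have hv : cellSpec t ws m k = (sols.getD (m - 1) []).getD k ([], none) := by
          rw [hdone (m - 1) (by omega)]
          unfold cellSpec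
          rw [hm1, hFeq]
        rw [e, hv]; exact hset _
      · -- m = 0 and no match: row untouched, spec is empty too
        have hm0' : m = 0 := by omega
        have e : ctA_step t ws k sols m = sols := by
          unfold ctA_step
          rw [← hword, if_neg hb1, if_neg hb2, if_neg hm0]
        have h2 : F t (ws.take m) k = none := by
          rw [hm0']; show F0 _ = none; simp [F0]; omega
        have hF1 : F t (ws.take (m + 1)) k = none := by
          rw [F_take_succ t ws m hm, ← hword]
          unfold stepF
          by_cases hcond : word.length ≤ k ∧ (t.drop (k - word.length)).take word.length = word
          · rw [if_pos hcond]
            obtain ⟨hLk', hsl⟩ := hcond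
            by_cases hLeq : word.length = k
            · exfalso; apply hb1
              rw [← hsl, hLeq]; simp
            · have h1 : F t (ws.take m) (k - word.length) = none := by
                rw [hm0']; show F0 _ = none; simp [F0]; omega
              rw [h1, h2]; rfl
          · rw [if_neg hcond]; exact h2
        have hv : cellSpec t ws m k = ([], none) := by
          unfold cellSpec; rw [hF1]
        rw [e]
        exact ⟨hlen, fun w hw => rfl, hrow m hm, fun j hj => rfl, htodo.trans hv.symm⟩

theorem getD_map_range' {α : Type} (f : Nat → α) (w n : Nat) (h : w < n) (d : α) :
    ((List.range n).map f).getD w d = f w := by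
  simp [List.getD, h]

theorem ctA_col (t : List Char) (ws : List (List Char)) (k : Nat)
    (hk1 : 1 ≤ k) (hkn : k ≤ t.length) :
    ∀ m, m ≤ ws.length → ∀ sols : List (List (List Char × Option Int)),
    sols.length = ws.length →
    (∀ w, w < ws.length → (sols.getD w []).length = t.length + 1) →
    (∀ w, w < ws.length → ∀ j, j ≤ t.length → j ≠ k →
      (sols.getD w []).getD j ([], none) =
        if 1 ≤ j ∧ j < k then cellSpec t ws w j else ([], none)) →
    (∀ w, w < ws.length → (sols.getD w []).getD k ([], none) = ([], none)) →
    ((List.range m).foldl (ctA_step t ws k) sols).length = ws.length ∧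
    (∀ w, w < ws.length →
      (((List.range m).foldl (ctA_step t ws k) sols).getD w []).length = t.length + 1) ∧
    (∀ w, w < ws.length → ∀ j, j ≠ k →
      (((List.range m).foldl (ctA_step t ws k) sols).getD w []).getD j ([], none) =
        (sols.getD w []).getD j ([], none)) ∧
    (∀ w, w < m →
      (((List.range m).foldl (ctA_step t ws k) sols).getD w []).getD k ([], none) =
        cellSpec t ws w k) ∧
    (∀ w, m ≤ w → w < ws.length →
      (((List.range m).foldl (ctA_step t ws k) sols).getD w []).getD k ([], none) = ([], none)) := by
  intro m
  induction m with
  | zero =>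
    intro _ sols hlen hrow hother htodo
    exact ⟨hlen, hrow, fun w hw j hj => rfl, fun w hw => absurd hw (by omega), fun w _ hw => htodo w hw⟩
  | succ m ih =>
    intro hm sols hlen hrow hother htodo
    have hmW : m < ws.length := by omega
    obtain ⟨ih1, ih2, ih3, ih4, ih5⟩ := ih (by omega) sols hlen hrow hother htodo
    set S := (List.range m).foldl (ctA_step t ws k) sols with hS
    have hSother : ∀ w, w < ws.length → ∀ j, j ≤ t.length → j ≠ k →
        (S.getD w []).getD j ([], none) =
          if 1 ≤ j ∧ j < k then cellSpec t ws w j else ([], none) := by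
      intro w hw j hj hjk
      rw [ih3 w hw j hjk]
      exact hother w hw j hj hjk
    obtain ⟨s1, s2, s3, s4, s5⟩ :=
      ctA_step_spec t ws k hk1 hkn m hmW S ih1 ih2 hSother
        (fun w hw => ih4 w hw) (ih5 m (le_refl m) hmW)
    rw [List.range_succ, List.foldl_append, List.foldl_cons, List.foldl_nil, ← hS]
    refine ⟨s1, ?_, ?_, ?_, ?_⟩
    · intro w hw
      by_cases hwm : w = m
      · rw [hwm]; exact s3
      · rw [s2 w hwm]; exact ih2 w hw
    · intro w hw j hjk
      by_cases hwm : w = m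
      · rw [hwm, s4 j hjk]
        exact ih3 m hmW j hjk
      · rw [s2 w hwm]
        exact ih3 w hw j hjk
    · intro w hw
      by_cases hwm : w = m
      · rw [hwm]; exact s5
      · rw [s2 w hwm]
        exact ih4 w (by omega)
    · intro w hwl hwr
      have hwm : w ≠ m := by omega
      rw [s2 w hwm]
      exact ih5 w (by omega) hwr

theorem ctA_outer (t : List Char) (ws : List (List Char)) :
    ∀ k, k ≤ t.length →
    (((List.range' 1 k).foldl (fun sols i => (List.range ws.length).foldl (ctA_step t ws i) sols)
      (ws.map (fun _ => (List.range (t.length + 1)).map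
        (fun _ => (([] : List Char), (none : Option Int))))))).length = ws.length ∧
    (∀ w, w < ws.length →
      ((((List.range' 1 k).foldl (fun sols i => (List.range ws.length).foldl (ctA_step t ws i) sols)
        (ws.map (fun _ => (List.range (t.length + 1)).map
          (fun _ => (([] : List Char), (none : Option Int)))))).getD w []).length = t.length + 1)) ∧
    (∀ w, w < ws.length → ∀ j, j ≤ t.length →
      ((((List.range' 1 k).foldl (fun sols i => (List.range ws.length).foldl (ctA_step t ws i) sols)
        (ws.map (fun _ => (List.range (t.length + 1)).map
          (fun _ => (([] : List Char), (none : Option Int)))))).getD w []).getD j ([], none) =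
        if 1 ≤ j ∧ j ≤ k then cellSpec t ws w j else ([], none))) := by
  intro k
  induction k with
  | zero =>
    intro _
    simp only [List.range'_zero, List.foldl_nil]
    refine ⟨by simp, ?_, ?_⟩
    · intro w hw
      have : (ws.map (fun _ => (List.range (t.length + 1)).map
          (fun _ => (([] : List Char), (none : Option Int))))).getD w [] =
          (List.range (t.length + 1)).map (fun _ => (([] : List Char), (none : Option Int))) := by
        simp only [List.getD]
        rw [List.getElem?_map, List.getElem?_eq_getElem hw]
        rfl
      rw [this]; simp
    · intro w hw j hj
      have : (ws.map (fun _ => (List.range (t.length + 1)).map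
          (fun _ => (([] : List Char), (none : Option Int))))).getD w [] =
          (List.range (t.length + 1)).map (fun _ => (([] : List Char), (none : Option Int))) := by
        simp only [List.getD]
        rw [List.getElem?_map, List.getElem?_eq_getElem hw]
        rfl
      rw [this, getD_map_range' _ j (t.length + 1) (by omega)]
      rw [if_neg (by omega)]
  | succ k ih =>
    intro hk
    obtain ⟨ih1, ih2, ih3⟩ := ih (by omega)
    rw [List.range'_1_concat, List.foldl_append, List.foldl_cons, List.foldl_nil]
    have hadd : 1 + k = k + 1 := by omega
    rw [hadd]
    set S := (List.range' 1 k).foldl (fun sols i => (List.range ws.length).foldl (ctA_step t ws i) sols)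
      (ws.map (fun _ => (List.range (t.length + 1)).map
        (fun _ => (([] : List Char), (none : Option Int))))) with hS
    obtain ⟨c1, c2, c3, c4, c5⟩ :=
      ctA_col t ws (k + 1) (by omega) (by omega) ws.length (le_refl _) S ih1 ih2
        (fun w hw j hj hjk => by
          rw [ih3 w hw j hj]
          by_cases h1 : 1 ≤ j ∧ j ≤ k
          · rw [if_pos h1, if_pos ⟨h1.1, by omega⟩]
          · rw [if_neg h1, if_neg (by omega)])
        (fun w hw => by
          rw [ih3 w hw (k + 1) (by omega)]
          rw [if_neg (by omega)])
    refine ⟨c1, c2, ?_⟩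
    intro w hw j hj
    by_cases hjk : j = k + 1
    · rw [hjk, c4 w hw, if_pos ⟨by omega, by omega⟩]
    · rw [c3 w hw j hjk, ih3 w hw j hj]
      by_cases h1 : 1 ≤ j ∧ j ≤ k
      · rw [if_pos h1, if_pos ⟨h1.1, by omega⟩]
      · rw [if_neg h1, if_neg (by omega)]

theorem alt_eqF (words : List String) (text : String) :
    construct_text_alt words text =
      match F text.toList (words.map String.toList) text.toList.length with
      | some v => v
      | none => -1 := by
  unfold construct_text_alt
  simp only []
  rw [← List.foldl_map (f := String.toList) (g := ctB_step text.toList)]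
  obtain ⟨b1, b2⟩ := ctB_fold text.toList (words.map String.toList) F0
    ((some (0 : Int)) :: List.replicate text.toList.length (none : Option Int))
    (by simp)
    (by
      intro j hj
      cases j with
      | zero => rfl
      | succ j =>
        show (List.replicate text.toList.length (none : Option Int)).getD j none = F0 (j + 1)
        simp [List.getD, F0])
  rw [b2 text.toList.length (le_refl _)]
  rfl

theorem a_eqF (words : List String) (text : String) (hw : words ≠ [])
    (ht : 1 ≤ text.toList.length) :
    construct_text words text =
      match F text.toList (words.map String.toList) text.toList.length with
      | some c => c
      | none => -1 := by
  have hW : 0 < (words.map String.toList).length := by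
    simp [List.length_pos_iff]; exact hw
  obtain ⟨o1, o2, o3⟩ := ctA_outer text.toList (words.map String.toList) text.toList.length (le_refl _)
  unfold construct_text
  simp only []
  rw [o3 ((words.map String.toList).length - 1) (by omega) text.toList.length (le_refl _),
    if_pos ⟨ht, le_refl _⟩, cellSpec_snd]
  have htake : (words.map String.toList).take ((words.map String.toList).length - 1 + 1) =
      words.map String.toList := by
    rw [show (words.map String.toList).length - 1 + 1 = (words.map String.toList).length by omega,
      List.take_length]
  rw [htake]

theorem a_empty (words : List String) (text : String) (hw : words ≠ [])
    (ht : text.toList = []) : construct_text words text = -1 := by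
  have hW : 0 < (words.map String.toList).length := by
    simp [List.length_pos_iff]; exact hw
  obtain ⟨o1, o2, o3⟩ := ctA_outer text.toList (words.map String.toList) 0 (by omega)
  unfold construct_text
  simp only []
  have hlen0 : text.toList.length = 0 := by rw [ht]; rfl
  rw [hlen0] at o3 ⊢
  rw [o3 ((words.map String.toList).length - 1) (by omega) 0 (le_refl _), if_neg (by omega)]

theorem b_empty (words : List String) (text : String) (ht : text.toList = []) :
    construct_text_alt words text = 0 := by
  rw [alt_eqF words text]
  have hF : F text.toList (words.map String.toList) text.toList.length = some 0 := by
    have hlen0 : text.toList.length = 0 := by rw [ht]; rfl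
    rw [hlen0]
    exact F_zero text.toList (words.map String.toList)
  rw [hF]

-- ===== VERDICT (by name: the statement is the Claim_ definition above) =====
theorem construct_text_spec : Claim_unchanged_construct_text := by
  intro words text _ hpre hnd
  have hw : words ≠ [] := hpre
  have ht : text.toList ≠ [] := fun h => hnd (String.toList_eq_nil_iff.mp h)
  have ht1 : 1 ≤ text.toList.length := by
    have := List.length_pos_iff.mpr ht
    omega
  rw [a_eqF words text hw ht1, alt_eqF words text]

theorem construct_text_changed : Claim_changed_construct_text := by
  unfold Claim_changed_construct_text; decide

theorem construct_text_tight : Claim_exact_construct_text := by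
  intro words text _ hpre hd
  have ht : text.toList = [] := by
    have he : text = "" := hd
    rw [he]; rfl
  rw [a_empty words text hpre ht, b_empty words text ht]
  decide
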